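-- pv_equiv track=rewrite | github.com/Matthew-Neba/python-leetcode | useful_problems/zig_zag_arrays_2.py | zigZagArrays
-- ===== SOURCE A (Python) =====
-- def zigZagArrays(n: int, l: int, r: int) -> int:
--     MOD = 10**9 + 7
--     # n here is really large, dp + prefix sum technique will not work
--     #
--     # we have a linear dp recurrence that uses the same space for all iterations,
--     # we can use the matrix exponentiation trick here. Will be instead log(n)
--
--     def mat_mul(A, B, MOD):
--         # compute A * B
--         ROWS, COLS, OFFSET = len(A), len(B[0]), len(B)
--
--         res = [[0] * COLS for _ in range(ROWS)]
--         for r in range(ROWS):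
--             for offset in range(OFFSET):
--                 if A[r][offset]:
--                     for c in range(COLS):
--                         res[r][c] += (A[r][offset] * B[offset][c]) % MOD
--
--         return res
--
--     def mat_expo(A, n, MOD):
--         ROWS, COLS = len(A), len(A[0])
--         # initialize to identity matrix
--         res = [[0] * COLS for _ in range(ROWS)]
--         for i in range(ROWS):
--             res[i][i] = 1
--
--         while n > 0:
--             if n & 1:
--                 res = mat_mul(res, A, MOD)
--
--             A = mat_mul(A,A,MOD)
--             n >>= 1
--
--         return res
--
--
--     vals = r - l + 1
--     k = 2 * vals
--
--     # upper vals are for up streak, lower vals are for down streak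
--     state_vector = [[1] for _ in range(k)]
--     mat = [[0] * k for _ in range(k)]
--
--     # build the state transition matrix
--     # first handle the upper half of the matrix (up)
--     for up in range(vals):
--         for down in range(up+1, vals):
--             mat[up][down + vals] = 1
--
--     # then handle lower half of the matrix (down)
--     for down in range(vals):
--         for up in range(down):
--             mat[down + vals][up] = 1
--
--     # now do the compute the n-1 state transition matrix
--     A = mat_expo(mat, n - 1, MOD)
--     new_state_vector = mat_mul(A, state_vector, MOD)
--
--     res = sum(row[0] for row in new_state_vector) % MOD
--     return res
-- ===== SOURCE B (Python) =====
-- def zigZagArrays(n: int, l: int, r: int) -> int: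
--     MOD = 10**9 + 7
--     v = r - l + 1
--
--     # Mirror symmetry: after every step the down-streak counts are the reversed
--     # up-streak counts, so a single v-dimensional state suffices.  One step maps
--     # up |-> T @ up with T[i][j] = 1 iff i + j + 1 < v (an exclusive prefix sum
--     # read in reverse), and the answer is twice the total of T^(n-1) applied to
--     # the all-ones vector, i.e. twice the sum of all entries of T^(n-1).
--     T = [[1 if i + j + 1 < v else 0 for j in range(v)] for i in range(v)]
--
--     def mul(X, Y):
--         size = len(X)
--         out = [[0] * size for _ in range(size)]
--         for i in range(size):
--             Xi, row = X[i], out[i]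
--             for t in range(size):
--                 x = Xi[t]
--                 Yt = Y[t]
--                 for j in range(size):
--                     row[j] = (row[j] + x * Yt[j]) % MOD
--         return out
--
--     def power(M, e):
--         if e <= 0:
--             return [[1 if i == j else 0 for j in range(len(M))] for i in range(len(M))]
--         H = power(M, e // 2)
--         S = mul(H, H)
--         return mul(S, M) if e % 2 else S
--
--     P = power(T, n - 1)
--     tot = sum(sum(row) for row in P)
--     return 2 * tot % MOD
-- ===== Notes on version B (the rewrite author's own statement) =====
-- stated objective: alternative
-- what changed: B halves the state using the up/down mirror symmetry (after every step the down-streak counts are the reversed up-streak counts): it builds the reduced v-by-v operator T[i][j] = 1 iff i+j+1 < v directly from that closed form instead of A's mutation loops over a 2v-by-2v matrix, raises it to the (n-1)-th power by a top-down recursive square-and-multiply (A: bottom-up iterative loop with an identity accumulator and a zero-entry guard), and returns twice the sum of all entries of T^(n-1) instead of multiplying by a state vector and summing a column.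
import Mathlib
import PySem

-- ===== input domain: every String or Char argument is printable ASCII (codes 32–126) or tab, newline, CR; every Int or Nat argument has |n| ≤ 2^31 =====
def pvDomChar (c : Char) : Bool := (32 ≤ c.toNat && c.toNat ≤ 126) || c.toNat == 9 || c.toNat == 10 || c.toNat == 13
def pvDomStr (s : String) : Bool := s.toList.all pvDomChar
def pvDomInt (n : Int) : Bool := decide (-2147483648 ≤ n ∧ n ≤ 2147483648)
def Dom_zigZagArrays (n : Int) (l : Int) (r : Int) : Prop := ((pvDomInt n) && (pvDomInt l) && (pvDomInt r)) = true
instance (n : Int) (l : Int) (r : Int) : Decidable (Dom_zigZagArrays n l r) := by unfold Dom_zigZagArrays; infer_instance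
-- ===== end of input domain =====

-- B halves the state by the up/down mirror symmetry (down-streak counts are the reversed
-- up-streak counts), so it exponentiates a v x v operator built in closed form instead of
-- A's 2v x 2v transition matrix, with a recursive top-down square-and-multiply, and returns
-- twice the sum of the entries of T^(n-1) (objective: alternative).

-- ===== PORT A =====
-- mat_mul: res[r][c] += (A[r][offset] * B[offset][c]) % MOD, guarded by `if A[r][offset]:`.
-- The inner `for c in range(COLS)` loop is rendered as a zipWith over the row (exact here:
-- every row of B has length COLS in all calls made by A).  `%` with the positive modulus
-- 10**9+7 is Lean's Int.emod, which agrees with Python's `%` for a positive divisor.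
def pvMatMul (A B : List (List Int)) (MOD : Int) : List (List Int) :=
  let ROWS := A.length
  let COLS := (B.headD []).length
  let OFFSET := B.length
  (List.range ROWS).map (fun r =>
    (List.range OFFSET).foldl (fun row offset =>
      if ((A[r]!)[offset]! : Int) ≠ 0 then
        List.zipWith (fun x b => x + ((A[r]!)[offset]! * b) % MOD) row (B[offset]!)
      else row)
      (List.replicate COLS 0))

-- the `while n > 0` loop of mat_expo; `n & 1` is PySem.Int.band, `n >>= 1` is `n >>> 1`
def pvExpoLoop (res A : List (List Int)) (n : Int) (MOD : Int) : List (List Int) :=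
  if 0 < n then
    let res' := if PySem.Int.band n 1 ≠ 0 then pvMatMul res A MOD else res
    pvExpoLoop res' (pvMatMul A A MOD) (n >>> (1:Nat)) MOD
  else res
termination_by n.toNat
decreasing_by
  have h2 : n >>> (1:ℕ) = n / 2 := by simpa using Int.shiftRight_eq_div_pow n 1
  rw [h2]; omega

-- mat_expo: the identity matrix (zeros with the diagonal set to 1), then the while loop
def pvMatExpo (A : List (List Int)) (n : Int) (MOD : Int) : List (List Int) :=
  let ROWS := A.length
  let COLS := (A.headD []).length
  let res := (List.range ROWS).map (fun i => (List.range COLS).map (fun j => if j = i then (1:Int) else 0))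
  pvExpoLoop res A n MOD

-- mat[i][j] = v (single Python index assignment)
def pvSet (m : List (List Int)) (i j : Nat) (v : Int) : List (List Int) :=
  m.set i ((m[i]!).set j v)

def zigZagArrays (n : Int) (l : Int) (r : Int) : Int :=
  let MOD : Int := 1000000007
  let vals := (r - l + 1).toNat
  let k := 2 * vals
  let state := List.replicate k [(1:Int)]
  let mat0 := (List.range k).map (fun _ => List.replicate k (0:Int))
  let mat1 := (List.range vals).foldl (fun m up =>
      (List.range' (up+1) (vals - (up+1))).foldl (fun m down => pvSet m up (down + vals) 1) m) mat0
  let mat2 := (List.range vals).foldl (fun m down =>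
      (List.range down).foldl (fun m up => pvSet m (down + vals) up 1) m) mat1
  let Ae := pvMatExpo mat2 (n - 1) MOD
  let ns := pvMatMul Ae state MOD
  (ns.map (fun row => row[0]!)).sum % MOD

-- ===== PORT B =====
-- B's mul: plain triple loop, res[i][j] = (res[i][j] + x*Y[t][j]) % MOD; the inner
-- `for j in range(size)` is rendered as a zipWith over the row (exact: every row of Y
-- has length size in all calls made by B)
def pvMulB (X Y : List (List Int)) (MOD : Int) : List (List Int) :=
  let size := X.length
  (List.range size).map (fun i =>
    (List.range size).foldl (fun row t =>
      List.zipWith (fun acc y => (acc + (X[i]!)[t]! * y) % MOD) row (Y[t]!))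
      (List.replicate size 0))

-- B's power: top-down recursive square-and-multiply (e <= 0 gives the identity)
def pvPowB (M : List (List Int)) (e : Int) (MOD : Int) : List (List Int) :=
  if e ≤ 0 then
    (List.range M.length).map (fun i => (List.range M.length).map (fun j => if i = j then (1:Int) else 0))
  else
    let H := pvPowB M (PySem.Int.floordiv e 2) MOD
    let S := pvMulB H H MOD
    if PySem.Int.mod e 2 ≠ 0 then pvMulB S M MOD else S
termination_by e.toNat
decreasing_by
  rw [PySem.Int.floordiv_eq_ediv_of_pos (by norm_num)]
  omega

def zigZagArrays_alt (n : Int) (l : Int) (r : Int) : Int :=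
  let MOD : Int := 1000000007
  let v := (r - l + 1).toNat
  let T := (List.range v).map (fun i => (List.range v).map (fun j => if i + j + 1 < v then (1:Int) else 0))
  let P := pvPowB T (n - 1) MOD
  let tot := (P.map (fun row => row.sum)).sum
  2 * tot % MOD

-- ===== PRECONDITION & SPEC =====
-- Pre_ excludes only r < l (empty value range), where A raises IndexError (mat_expo indexes
-- the first row of the then-empty transition matrix); B happens to return 0 there.
def Pre_zigZagArrays (n : Int) (l : Int) (r : Int) : Prop := l ≤ r
instance (n : Int) (l : Int) (r : Int) : Decidable (Pre_zigZagArrays n l r) := by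
  unfold Pre_zigZagArrays; infer_instance

def pvWitness_zigZagArrays : Int × Int × Int := (3, 1, 3)

def Spec_zigZagArrays (n : Int) (l : Int) (r : Int) (out : Int) : Prop := out = zigZagArrays_alt n l r
instance (n : Int) (l : Int) (r : Int) (out : Int) : Decidable (Spec_zigZagArrays n l r out) := by
  unfold Spec_zigZagArrays; infer_instance

-- ===== CLAIM (what is proved, stated in full; the proofs are below) =====
def Claim_equal_zigZagArrays : Prop := ∀ (n : Int) (l : Int) (r : Int), Dom_zigZagArrays n l r → Pre_zigZagArrays n l r → Spec_zigZagArrays n l r (zigZagArrays n l r)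

-- ===== LEMMAS AND PROOFS =====

-- The common mathematical model: matrices over ZMod (10^9 + 7).
abbrev pvp : ℕ := 1000000007

-- an Int list-of-lists matrix represents a ZMod matrix entrywise (mod 10^9+7)
def MRep (m c : ℕ) (L : List (List Int)) (N : Matrix (Fin m) (Fin c) (ZMod pvp)) : Prop :=
  L.length = m ∧ (∀ row ∈ L, row.length = c) ∧
    ∀ (i : Fin m) (j : Fin c), (((L[i.1]!)[j.1]! : Int) : ZMod pvp) = N i j

-- the zigzag transition matrix (v values; index < v = ending on an up-step, ≥ v = down-step)
def pvM (v : ℕ) : Matrix (Fin (2*v)) (Fin (2*v)) (ZMod pvp) := fun i j =>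
  if (i.1 < v ∧ v + i.1 < j.1) ∨ (j.1 < v ∧ j.1 + v < i.1) then 1 else 0

-- the all-ones start vector
def pvW0 (v : ℕ) : Matrix (Fin (2*v)) (Fin 1) (ZMod pvp) := fun _ _ => 1

theorem pv_castmod (a : Int) : (((a % (1000000007:Int)) : Int) : ZMod pvp) = (a : ZMod pvp) := by
  have := ZMod.intCast_mod a 1000000007
  simpa using this

theorem pv_mod_eq_of_cast_eq {a b : Int} (h : (a : ZMod pvp) = (b : ZMod pvp)) :
    a % (1000000007:Int) = b % (1000000007:Int) := by
  rw [ZMod.intCast_eq_intCast_iff] at h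
  simpa [Int.ModEq] using h

theorem pv_sum_range_fin {M : Type} [AddCommMonoid M] (n : ℕ) (f : Fin n → M) (g : ℕ → M)
    (h : ∀ (i : ℕ) (hi : i < n), g i = f ⟨i, hi⟩) :
    ∑ i ∈ Finset.range n, g i = ∑ i : Fin n, f i := by
  rw [← Fin.sum_univ_eq_sum_range]
  exact Finset.sum_congr rfl (fun i _ => h i.1 i.isLt)

theorem pv_list_cast_sum_fin {k : ℕ} (xs : List Int) (hlen : xs.length = k)
    (w : Fin k → ZMod pvp) (h : ∀ i : Fin k, ((xs[i.1]! : Int) : ZMod pvp) = w i) :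
    ((xs.sum : Int) : ZMod pvp) = ∑ i : Fin k, w i := by
  rw [Int.cast_list_sum]
  have h2 : xs.map (fun x : Int => (x : ZMod pvp))
      = (List.range k).map (fun i : ℕ => if hi : i < k then w ⟨i, hi⟩ else 0) := by
    apply List.ext_getElem (by simp [hlen])
    intro i hi1 hi2
    have hik : i < k := by simpa [hlen] using hi1
    simp only [List.getElem_map, List.getElem_range, dif_pos hik]
    rw [← h ⟨i, hik⟩]
    congr 1
    exact (getElem!_pos xs i (by omega)).symm
  rw [h2]
  exact pv_sum_range_fin k w _ (fun i hi => by simp [hi])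

-- row invariant for the offset loop of mat_mul
theorem pv_row_fold {c o : ℕ} (LA LB : List (List Int)) (r : ℕ)
    (hBr : ∀ row ∈ LB, row.length = c) (hBlen : LB.length = o) :
    ∀ (os : List ℕ) (init : List Int), (∀ x ∈ os, x < o) → init.length = c →
      (os.foldl (fun row offset =>
          if ((LA[r]!)[offset]! : Int) ≠ 0 then
            List.zipWith (fun x b => x + ((LA[r]!)[offset]! * b) % (1000000007:Int)) row (LB[offset]!)
          else row) init).length = c ∧
      ∀ j : ℕ, j < c →
        (os.foldl (fun row offset =>
          if ((LA[r]!)[offset]! : Int) ≠ 0 then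
            List.zipWith (fun x b => x + ((LA[r]!)[offset]! * b) % (1000000007:Int)) row (LB[offset]!)
          else row) init)[j]!
          = init[j]! + (os.map (fun off => ((LA[r]!)[off]! * (LB[off]!)[j]!) % 1000000007)).sum := by
  intro os
  induction os with
  | nil => intro init _ hinit; exact ⟨hinit, fun j hj => by simp⟩
  | cons off os ih =>
    intro init hos hinit
    have hoff : off < o := hos off (List.mem_cons_self)
    have hBoff : (LB[off]!).length = c := by
      rw [getElem!_pos LB off (by omega)]
      exact hBr _ (List.getElem_mem _)
    have hs1 : (if ((LA[r]!)[off]! : Int) ≠ 0 then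
          List.zipWith (fun x b => x + ((LA[r]!)[off]! * b) % (1000000007:Int)) init (LB[off]!)
        else init).length = c := by
      by_cases ha : ((LA[r]!)[off]! : Int) ≠ 0
      · rw [if_pos ha, List.length_zipWith]; omega
      · rw [if_neg ha]; exact hinit
    have hs2 : ∀ j : ℕ, j < c →
        (if ((LA[r]!)[off]! : Int) ≠ 0 then
          List.zipWith (fun x b => x + ((LA[r]!)[off]! * b) % (1000000007:Int)) init (LB[off]!)
        else init)[j]! = init[j]! + ((LA[r]!)[off]! * (LB[off]!)[j]!) % 1000000007 := by
      intro j hj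
      by_cases ha : ((LA[r]!)[off]! : Int) ≠ 0
      · rw [if_pos ha]
        rw [getElem!_pos _ j (by rw [List.length_zipWith]; omega), List.getElem_zipWith,
            getElem!_pos init j (by omega), getElem!_pos (LB[off]!) j (by omega)]
      · rw [if_neg ha]
        push_neg at ha
        rw [ha, zero_mul, Int.zero_emod, add_zero]
    simp only [List.foldl_cons]
    obtain ⟨ih1, ih2⟩ := ih _ (fun x hx => hos x (List.mem_cons_of_mem _ hx)) hs1
    refine ⟨ih1, fun j hj => ?_⟩
    rw [ih2 j hj, hs2 j hj, List.map_cons, List.sum_cons]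
    ring

theorem pv_matMul_rep {m c o : ℕ} (ho : 0 < o) {LA LB : List (List Int)}
    {NA : Matrix (Fin m) (Fin o) (ZMod pvp)} {NB : Matrix (Fin o) (Fin c) (ZMod pvp)}
    (hA : MRep m o LA NA) (hB : MRep o c LB NB) :
    MRep m c (pvMatMul LA LB 1000000007) (NA * NB) := by
  obtain ⟨hAlen, hArows, hAe⟩ := hA
  obtain ⟨hBlen, hBrows, hBe⟩ := hB
  have hhead : (LB.headD []).length = c := by
    cases LB with
    | nil => simp at hBlen; omega
    | cons b0 t => exact hBrows b0 (List.mem_cons_self)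
  have hres : pvMatMul LA LB 1000000007 = (List.range m).map (fun r =>
      (List.range o).foldl (fun row offset =>
        if ((LA[r]!)[offset]! : Int) ≠ 0 then
          List.zipWith (fun x b => x + ((LA[r]!)[offset]! * b) % (1000000007:Int)) row (LB[offset]!)
        else row) (List.replicate c 0)) := by
    unfold pvMatMul
    rw [hhead, hAlen, hBlen]
  have hrowfold := pv_row_fold (c := c) (o := o) LA LB (hBr := hBrows) (hBlen := hBlen)
  rw [hres]
  refine ⟨by simp, ?_, ?_⟩
  · intro row hrow
    simp only [List.mem_map, List.mem_range] at hrow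
    obtain ⟨r, hr, rfl⟩ := hrow
    exact (hrowfold r (List.range o) (List.replicate c 0) (by simp) (by simp)).1
  · intro i j
    rw [getElem!_pos _ i.1 (by simp [i.isLt]), List.getElem_map, List.getElem_range]
    obtain ⟨-, hent⟩ := hrowfold i.1 (List.range o) (List.replicate c 0) (by simp) (by simp)
    rw [hent j.1 j.isLt]
    rw [getElem!_pos _ j.1 (by simp [j.isLt]), List.getElem_replicate]
    rw [zero_add, Int.cast_list_sum, List.map_map]
    have : ((List.range o).map ((fun x : Int => (x : ZMod pvp)) ∘ (fun off => ((LA[i.1]!)[off]! * (LB[off]!)[j.1]!) % 1000000007))).sum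
        = ∑ x ∈ Finset.range o, ((((LA[i.1]!)[x]! * (LB[x]!)[j.1]!) % 1000000007 : Int) : ZMod pvp) := rfl
    rw [this, Matrix.mul_apply]
    apply pv_sum_range_fin
    intro x hx
    rw [← hAe i ⟨x, hx⟩, ← hBe ⟨x, hx⟩ j, pv_castmod]
    push_cast
    ring

theorem pv_expoLoop_rep {k : ℕ} (hk : 0 < k) :
    ∀ (t : ℕ) (nn : Int), nn.toNat ≤ t →
    ∀ (res A : List (List Int)) (Nres NA : Matrix (Fin k) (Fin k) (ZMod pvp)),
      MRep k k res Nres → MRep k k A NA →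
      MRep k k (pvExpoLoop res A nn 1000000007) (Nres * NA ^ nn.toNat) := by
  intro t
  induction t with
  | zero =>
    intro nn hle res A Nres NA hres hA
    have hn : ¬ 0 < nn := by omega
    rw [pvExpoLoop, if_neg hn]
    have : nn.toNat = 0 := by omega
    rw [this, pow_zero, mul_one]
    exact hres
  | succ t ih =>
    intro nn hle res A Nres NA hres hA
    by_cases hn : 0 < nn
    · rw [pvExpoLoop, if_pos hn]
      have hshift : nn >>> (1:ℕ) = nn / 2 := by simpa using Int.shiftRight_eq_div_pow nn 1
      have hband : (PySem.Int.band nn 1 ≠ 0) ↔ nn % 2 = 1 := by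
        rw [PySem.Int.band_one, PySem.Int.mod_eq_emod_of_pos (by norm_num)]
        omega
      have hrec := ih (nn / 2) (by omega)
      set e := nn.toNat with he
      have he2 : (nn / 2).toNat = e / 2 := by omega
      by_cases hodd : PySem.Int.band nn 1 ≠ 0
      · simp only [if_pos hodd, hshift]
        have h1 := hrec _ _ _ _ (pv_matMul_rep hk hres hA) (pv_matMul_rep hk hA hA)
        rw [he2] at h1
        have heq : Nres * NA * (NA * NA) ^ (e / 2) = Nres * NA ^ e := by
          have hcode : e = 2 * (e / 2) + 1 := by
            have : nn % 2 = 1 := hband.mp hodd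
            omega
          rw [← pow_two, ← pow_mul]
          rw [mul_assoc, ← pow_succ']
          congr 2
          omega
        rwa [heq] at h1
      · simp only [if_neg hodd, hshift]
        have h1 := hrec _ _ _ _ hres (pv_matMul_rep hk hA hA)
        rw [he2] at h1
        have heq : Nres * (NA * NA) ^ (e / 2) = Nres * NA ^ e := by
          have hcode : e = 2 * (e / 2) := by
            have : ¬ nn % 2 = 1 := fun h => hodd (hband.mpr h)
            omega
          rw [← pow_two, ← pow_mul, ← hcode]
        rwa [heq] at h1
    · rw [pvExpoLoop, if_neg hn]
      have : nn.toNat = 0 := by omega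
      rw [this, pow_zero, mul_one]
      exact hres

theorem pv_matExpo_rep {k : ℕ} (hk : 0 < k) (nn : Int) {A : List (List Int)}
    {NA : Matrix (Fin k) (Fin k) (ZMod pvp)} (hA : MRep k k A NA) :
    MRep k k (pvMatExpo A nn 1000000007) (NA ^ nn.toNat) := by
  obtain ⟨hAlen, hArows, hAe⟩ := hA
  have hhead : (A.headD []).length = k := by
    cases A with
    | nil => simp at hAlen; omega
    | cons a0 t => exact hArows a0 (List.mem_cons_self)
  have hid : MRep k k ((List.range k).map (fun i => (List.range k).map (fun j => if j = i then (1:Int) else 0))) (1 : Matrix (Fin k) (Fin k) (ZMod pvp)) := by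
    refine ⟨by simp, ?_, ?_⟩
    · intro row hrow
      simp only [List.mem_map, List.mem_range] at hrow
      obtain ⟨i, hi, rfl⟩ := hrow
      simp
    · intro i j
      rw [getElem!_pos _ i.1 (by simp [i.isLt]), List.getElem_map, List.getElem_range,
          getElem!_pos _ j.1 (by simp [j.isLt]), List.getElem_map, List.getElem_range]
      rw [Matrix.one_apply]
      by_cases hij : j.1 = i.1
      · rw [if_pos hij, if_pos (by exact (Fin.ext hij).symm)]
        simp
      · rw [if_neg hij, if_neg (fun h => hij (congrArg Fin.val h).symm)]
        simp
  have := pv_expoLoop_rep hk nn.toNat nn le_rfl _ A 1 NA hid ⟨hAlen, hArows, hAe⟩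
  rw [one_mul] at this
  unfold pvMatExpo
  rw [hAlen, hhead]
  exact this

theorem pv_pvSet_shape {k : ℕ} (m : List (List Int)) (hlen : m.length = k)
    (hrows : ∀ row ∈ m, row.length = k) (i j : ℕ) (hi : i < k) (v : Int) :
    (pvSet m i j v).length = k ∧ ∀ row ∈ pvSet m i j v, row.length = k := by
  refine ⟨by simp [pvSet, hlen], ?_⟩
  intro row hrow
  rcases List.mem_or_eq_of_mem_set hrow with h | h
  · exact hrows row h
  · subst h
    rw [List.length_set]
    rw [getElem!_pos m i (by omega)]
    exact hrows _ (List.getElem_mem _)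

theorem pv_pvSet_entry {k : ℕ} (m : List (List Int)) (hlen : m.length = k)
    (hrows : ∀ row ∈ m, row.length = k) (i j : ℕ) (hi : i < k) (hj : j < k) (v : Int)
    (i' j' : ℕ) (hi' : i' < k) (hj' : j' < k) :
    ((pvSet m i j v)[i']!)[j']! = if i' = i ∧ j' = j then v else (m[i']!)[j']! := by
  have hrowi : (m[i]!).length = k := by
    rw [getElem!_pos m i (by omega)]
    exact hrows _ (List.getElem_mem _)
  have hpv : pvSet m i j v = m.set i ((m[i]!).set j v) := rfl
  have hlen2 : (m.set i ((m[i]!).set j v)).length = k := by rw [List.length_set]; omega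
  have hrowlen2 : ((m[i]!).set j v).length = k := by rw [List.length_set]; omega
  rw [hpv]
  by_cases hii : i' = i
  · subst hii
    have h1 : (m.set i' ((m[i']!).set j v))[i']! = (m[i']!).set j v := by
      rw [getElem!_pos _ i' (by omega), List.getElem_set_self (by omega)]
    rw [h1]
    by_cases hjj : j' = j
    · subst hjj
      rw [if_pos ⟨rfl, rfl⟩]
      rw [getElem!_pos _ j' (by omega), List.getElem_set_self (by omega)]
    · rw [if_neg (fun h => hjj h.2)]
      rw [getElem!_pos _ j' (by omega),
          List.getElem_set_ne (fun h => hjj h.symm) (by omega),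
          getElem!_pos _ j' (by omega)]
  · rw [if_neg (fun h => hii h.1)]
    congr 1
    rw [getElem!_pos _ i' (by omega),
        List.getElem_set_ne (fun h => hii h.symm) (by omega),
        getElem!_pos _ i' (by omega)]

theorem pv_foldl_pvSet {k : ℕ} : ∀ (ps : List (ℕ × ℕ)), (∀ pr ∈ ps, pr.1 < k ∧ pr.2 < k) →
    ∀ (m : List (List Int)), m.length = k → (∀ row ∈ m, row.length = k) →
      (ps.foldl (fun mm pr => pvSet mm pr.1 pr.2 1) m).length = k ∧
      (∀ row ∈ ps.foldl (fun mm pr => pvSet mm pr.1 pr.2 1) m, row.length = k) ∧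
      ∀ i j : ℕ, i < k → j < k →
        (((ps.foldl (fun mm pr => pvSet mm pr.1 pr.2 1) m)[i]!)[j]!)
          = if (i, j) ∈ ps then 1 else (m[i]!)[j]! := by
  intro ps
  induction ps with
  | nil => exact fun _ m h1 h2 => ⟨h1, h2, fun i j _ _ => by simp⟩
  | cons pr ps ih =>
    intro hps m hlen hrows
    have hpr := hps pr List.mem_cons_self
    obtain ⟨hs1, hs2⟩ := pv_pvSet_shape m hlen hrows pr.1 pr.2 hpr.1 1
    obtain ⟨ih1, ih2, ih3⟩ := ih (fun q hq => hps q (List.mem_cons_of_mem _ hq)) _ hs1 hs2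
    simp only [List.foldl_cons]
    refine ⟨ih1, ih2, fun i j hi hj => ?_⟩
    rw [ih3 i j hi hj, pv_pvSet_entry m hlen hrows pr.1 pr.2 hpr.1 hpr.2 1 i j hi hj]
    by_cases h1 : (i, j) ∈ ps
    · rw [if_pos h1, if_pos (List.mem_cons_of_mem _ h1)]
    · rw [if_neg h1]
      by_cases h2 : i = pr.1 ∧ j = pr.2
      · rw [if_pos h2, if_pos (by
          rw [List.mem_cons]
          exact Or.inl (Prod.ext h2.1 h2.2))]
      · rw [if_neg h2, if_neg (by
          rw [List.mem_cons]
          rintro (h | h)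
          · exact h2 ⟨congrArg Prod.fst h, congrArg Prod.snd h⟩
          · exact h1 h)]

theorem pv_matBuild_rep (v : ℕ) (hv : 0 < v) :
    MRep (2*v) (2*v)
      ((List.range v).foldl (fun m down =>
          (List.range down).foldl (fun m up => pvSet m (down + v) up 1) m)
        ((List.range v).foldl (fun m up =>
          (List.range' (up+1) (v - (up+1))).foldl (fun m down => pvSet m up (down + v) 1) m)
          ((List.range (2*v)).map (fun _ => List.replicate (2*v) (0:Int)))))
      (pvM v) := by
  have h0len : ((List.range (2*v)).map (fun _ => List.replicate (2*v) (0:Int))).length = 2*v := by simp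
  have h0rows : ∀ row ∈ (List.range (2*v)).map (fun _ => List.replicate (2*v) (0:Int)), row.length = 2*v := by
    intro row hrow
    simp only [List.mem_map] at hrow
    obtain ⟨_, _, rfl⟩ := hrow
    simp
  have h0ent : ∀ i j : ℕ, i < 2*v → j < 2*v →
      ((((List.range (2*v)).map (fun _ => List.replicate (2*v) (0:Int)))[i]!)[j]!) = 0 := by
    intro i j hi hj
    rw [getElem!_pos _ i (by simpa using hi), List.getElem_map,
        getElem!_pos _ j (by simpa using hj), List.getElem_replicate]
  set ps1 := (List.range v).flatMap (fun up => (List.range' (up+1) (v - (up+1))).map (fun d => (up, d + v))) with hps1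
  set ps2 := (List.range v).flatMap (fun down => (List.range down).map (fun u => (down + v, u))) with hps2
  -- both build phases as flat lists of (row, col) writes
  have hph1 : ∀ m0 : List (List Int), ps1.foldl (fun mm pr => pvSet mm pr.1 pr.2 1) m0
      = (List.range v).foldl (fun m up =>
        (List.range' (up+1) (v - (up+1))).foldl (fun m down => pvSet m up (down + v) 1) m) m0 := by
    intro m0
    rw [hps1, List.foldl_flatMap]
    simp only [List.foldl_map]
  have hph2 : ∀ m0 : List (List Int), ps2.foldl (fun mm pr => pvSet mm pr.1 pr.2 1) m0
      = (List.range v).foldl (fun m down =>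
        (List.range down).foldl (fun m up => pvSet m (down + v) up 1) m) m0 := by
    intro m0
    rw [hps2, List.foldl_flatMap]
    simp only [List.foldl_map]
  rw [← hph1, ← hph2]
  have hmem1 : ∀ i j : ℕ, ((i, j) ∈ ps1 ↔ i < v ∧ v + i < j ∧ j < 2*v) := by
    intro i j
    rw [hps1]
    simp only [List.mem_flatMap, List.mem_map, List.mem_range, List.mem_range'_1, Prod.mk.injEq]
    constructor
    · rintro ⟨up, hup, d, ⟨hd1, hd2⟩, rfl, rfl⟩
      omega
    · rintro ⟨h1, h2, h3⟩
      exact ⟨i, h1, j - v, by omega, rfl, by omega⟩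
  have hmem2 : ∀ i j : ℕ, ((i, j) ∈ ps2 ↔ j < v ∧ j + v < i ∧ i < 2*v) := by
    intro i j
    rw [hps2]
    simp only [List.mem_flatMap, List.mem_map, List.mem_range, Prod.mk.injEq]
    constructor
    · rintro ⟨down, hdown, u, hu, rfl, rfl⟩
      omega
    · rintro ⟨h1, h2, h3⟩
      exact ⟨i - v, by omega, j, by omega, by omega, rfl⟩
  have hbound1 : ∀ pr ∈ ps1, pr.1 < 2*v ∧ pr.2 < 2*v := by
    intro pr hpr
    have := (hmem1 pr.1 pr.2).mp (by simpa using hpr)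
    omega
  have hbound2 : ∀ pr ∈ ps2, pr.1 < 2*v ∧ pr.2 < 2*v := by
    intro pr hpr
    have := (hmem2 pr.1 pr.2).mp (by simpa using hpr)
    omega
  obtain ⟨h1len, h1rows, h1ent⟩ := pv_foldl_pvSet ps1 hbound1 _ h0len h0rows
  obtain ⟨h2len, h2rows, h2ent⟩ := pv_foldl_pvSet ps2 hbound2 _ h1len h1rows
  refine ⟨h2len, h2rows, ?_⟩
  intro i j
  rw [h2ent i.1 j.1 i.isLt j.isLt, h1ent i.1 j.1 i.isLt j.isLt]
  unfold pvM
  by_cases hc2 : (i.1, j.1) ∈ ps2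
  · have := (hmem2 i.1 j.1).mp hc2
    rw [if_pos hc2, if_pos (by omega)]
    simp
  · rw [if_neg hc2]
    by_cases hc1 : (i.1, j.1) ∈ ps1
    · have := (hmem1 i.1 j.1).mp hc1
      rw [if_pos hc1, if_pos (by omega)]
      simp
    · rw [if_neg hc1, h0ent i.1 j.1 i.isLt j.isLt]
      have hn1 := fun h => hc1 ((hmem1 i.1 j.1).mpr h)
      have hn2 := fun h => hc2 ((hmem2 i.1 j.1).mpr h)
      rw [if_neg (by
        rintro (⟨ha, hb⟩ | ⟨ha, hb⟩)
        · exact hn1 ⟨ha, hb, j.isLt⟩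
        · exact hn2 ⟨ha, hb, i.isLt⟩)]
      simp

-- the reduced v-dimensional operator of B (one step on the up-streak counts)
def pvU (v : ℕ) : Matrix (Fin v) (Fin v) (ZMod pvp) := fun i j =>
  if i.1 + j.1 + 1 < v then 1 else 0

-- the embedding of the reduced state into the full one (down = reversed up)
def pvE (v : ℕ) : Matrix (Fin (2*v)) (Fin v) (ZMod pvp) := fun i j =>
  if (i.1 < v ∧ j.1 = i.1) ∨ (v ≤ i.1 ∧ i.1 + j.1 = 2*v - 1) then 1 else 0

theorem pv_sum_ite_one {m : ℕ} (C : Fin m → Prop) [DecidablePred C] (f : Fin m → ZMod pvp)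
    (a : Fin m) (ha : ∀ x, C x ↔ x = a) :
    (∑ x : Fin m, if C x then f x else 0) = f a := by
  have h1 : ∀ x : Fin m, (if C x then f x else 0) = if x = a then f x else 0 := by
    intro x
    by_cases hx : x = a
    · rw [if_pos ((ha x).mpr hx), if_pos hx]
    · rw [if_neg (fun hc => hx ((ha x).mp hc)), if_neg hx]
  rw [Finset.sum_congr rfl (fun x _ => h1 x), Finset.sum_ite_eq' Finset.univ a f,
      if_pos (Finset.mem_univ a)]

theorem pv_sum_ite_two {m : ℕ} (C : Fin m → Prop) [DecidablePred C] (f : Fin m → ZMod pvp)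
    (a b : Fin m) (hab : a ≠ b) (ha : ∀ x, C x ↔ x = a ∨ x = b) :
    (∑ x : Fin m, if C x then f x else 0) = f a + f b := by
  have h1 : ∀ x : Fin m, (if C x then f x else 0)
      = (if x = a then f x else 0) + (if x = b then f x else 0) := by
    intro x
    by_cases hxa : x = a
    · subst hxa
      rw [if_pos ((ha x).mpr (Or.inl rfl)), if_pos rfl, if_neg hab, add_zero]
    · by_cases hxb : x = b
      · subst hxb
        rw [if_pos ((ha x).mpr (Or.inr rfl)), if_neg hxa, if_pos rfl, zero_add]
      · rw [if_neg (fun hc => (ha x).mp hc |>.elim hxa hxb), if_neg hxa, if_neg hxb, add_zero]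
  rw [Finset.sum_congr rfl (fun x _ => h1 x), Finset.sum_add_distrib,
      Finset.sum_ite_eq' Finset.univ a f, Finset.sum_ite_eq' Finset.univ b f,
      if_pos (Finset.mem_univ a), if_pos (Finset.mem_univ b)]

theorem pv_ME (v : ℕ) (hv : 0 < v) : pvM v * pvE v = pvE v * pvU v := by
  ext i j
  rw [Matrix.mul_apply, Matrix.mul_apply]
  have hj := j.isLt
  have hi2 := i.isLt
  -- LHS: exactly two k's hit a nonzero column entry of E
  have hL : (∑ k : Fin (2*v), pvM v i k * pvE v k j)
      = pvM v i ⟨j.1, by omega⟩ + pvM v i ⟨2*v - 1 - j.1, by omega⟩ := by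
    have h1 : ∀ k : Fin (2*v), pvM v i k * pvE v k j
        = if (k.1 < v ∧ j.1 = k.1) ∨ (v ≤ k.1 ∧ k.1 + j.1 = 2*v - 1) then pvM v i k else 0 := by
      intro k
      show pvM v i k * (if _ then (1:ZMod pvp) else 0) = _
      rw [mul_ite, mul_one, mul_zero]
    rw [Finset.sum_congr rfl (fun k _ => h1 k)]
    apply pv_sum_ite_two _ _ ⟨j.1, by omega⟩ ⟨2*v - 1 - j.1, by omega⟩
      (by rw [Ne, Fin.ext_iff]; show ¬ (j.1 = 2*v - 1 - j.1); omega)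
    intro k
    rw [Fin.ext_iff, Fin.ext_iff]
    show _ ↔ k.1 = j.1 ∨ k.1 = 2*v - 1 - j.1
    have := k.isLt
    omega
  -- RHS: exactly one k hits a nonzero row entry of E
  have hR : (∑ k : Fin v, pvE v i k * pvU v k j)
      = (if hiv : i.1 < v then pvU v ⟨i.1, hiv⟩ j else pvU v ⟨2*v - 1 - i.1, by omega⟩ j) := by
    have h1 : ∀ k : Fin v, pvE v i k * pvU v k j
        = if (i.1 < v ∧ k.1 = i.1) ∨ (v ≤ i.1 ∧ i.1 + k.1 = 2*v - 1) then pvU v k j else 0 := by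
      intro k
      show (if _ then (1:ZMod pvp) else 0) * pvU v k j = _
      rw [ite_mul, one_mul, zero_mul]
    rw [Finset.sum_congr rfl (fun k _ => h1 k)]
    by_cases hiv : i.1 < v
    · rw [dif_pos hiv]
      apply pv_sum_ite_one _ _ ⟨i.1, hiv⟩
      intro k
      rw [Fin.ext_iff]
      show _ ↔ k.1 = i.1
      have := k.isLt
      omega
    · rw [dif_neg hiv]
      apply pv_sum_ite_one _ _ ⟨2*v - 1 - i.1, by omega⟩
      intro k
      rw [Fin.ext_iff]
      show _ ↔ k.1 = 2*v - 1 - i.1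
      have := k.isLt
      omega
  rw [hL, hR]
  by_cases hiv : i.1 < v
  · rw [dif_pos hiv]
    simp only [pvM, pvU, Fin.val_mk]
    split_ifs <;> first | (exfalso; omega) | norm_num
  · rw [dif_neg hiv]
    simp only [pvM, pvU, Fin.val_mk]
    split_ifs <;> first | (exfalso; omega) | norm_num

theorem pv_E_row (v : ℕ) (hv : 0 < v) (k : Fin (2*v)) : (∑ j : Fin v, pvE v k j) = 1 := by
  have hk := k.isLt
  have h1 : ∀ j : Fin v, pvE v k j
      = if (k.1 < v ∧ j.1 = k.1) ∨ (v ≤ k.1 ∧ k.1 + j.1 = 2*v - 1) then (fun _ : Fin v => (1:ZMod pvp)) j else 0 := by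
    intro j; rfl
  rw [Finset.sum_congr rfl (fun j _ => h1 j)]
  by_cases hkv : k.1 < v
  · exact pv_sum_ite_one _ _ ⟨k.1, hkv⟩ (fun j => by
      rw [Fin.ext_iff]; show _ ↔ j.1 = k.1; have := j.isLt; omega)
  · exact pv_sum_ite_one _ _ ⟨2*v - 1 - k.1, by omega⟩ (fun j => by
      rw [Fin.ext_iff]; show _ ↔ j.1 = 2*v - 1 - k.1; have := j.isLt; omega)

theorem pv_E_col (v : ℕ) (hv : 0 < v) (j : Fin v) : (∑ i : Fin (2*v), pvE v i j) = 2 := by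
  have hj := j.isLt
  have h1 : ∀ i : Fin (2*v), pvE v i j
      = if (i.1 < v ∧ j.1 = i.1) ∨ (v ≤ i.1 ∧ i.1 + j.1 = 2*v - 1) then (fun _ : Fin (2*v) => (1:ZMod pvp)) i else 0 := by
    intro i; rfl
  rw [Finset.sum_congr rfl (fun i _ => h1 i)]
  rw [pv_sum_ite_two _ _ ⟨j.1, by omega⟩ ⟨2*v - 1 - j.1, by omega⟩
    (by rw [Ne, Fin.ext_iff]; show ¬ (j.1 = 2*v - 1 - j.1); omega)
    (fun i => by
      rw [Fin.ext_iff, Fin.ext_iff]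
      show _ ↔ i.1 = j.1 ∨ i.1 = 2*v - 1 - j.1
      have := i.isLt
      omega)]
  norm_num

theorem pv_pow_comm (v : ℕ) (hv : 0 < v) : ∀ t : ℕ, pvM v ^ t * pvE v = pvE v * pvU v ^ t := by
  intro t
  induction t with
  | zero => rw [pow_zero, pow_zero, Matrix.one_mul, Matrix.mul_one]
  | succ t ih =>
    rw [pow_succ', pow_succ', Matrix.mul_assoc, ih, ← Matrix.mul_assoc, pv_ME v hv,
        Matrix.mul_assoc]

theorem pv_entry_sums (v : ℕ) (hv : 0 < v) (e : ℕ) :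
    (∑ i : Fin (2*v), ∑ k : Fin (2*v), (pvM v ^ e) i k)
      = 2 * ∑ k : Fin v, ∑ j : Fin v, (pvU v ^ e) k j := by
  have way1 : (∑ i : Fin (2*v), ∑ j : Fin v, (pvM v ^ e * pvE v) i j)
      = ∑ i : Fin (2*v), ∑ k : Fin (2*v), (pvM v ^ e) i k := by
    apply Finset.sum_congr rfl
    intro i _
    have : ∀ j : Fin v, (pvM v ^ e * pvE v) i j = ∑ k : Fin (2*v), (pvM v ^ e) i k * pvE v k j :=
      fun j => Matrix.mul_apply
    rw [Finset.sum_congr rfl (fun j _ => this j), Finset.sum_comm]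
    apply Finset.sum_congr rfl
    intro k _
    rw [← Finset.mul_sum, pv_E_row v hv k, mul_one]
  have way2 : (∑ i : Fin (2*v), ∑ j : Fin v, (pvE v * pvU v ^ e) i j)
      = 2 * ∑ k : Fin v, ∑ j : Fin v, (pvU v ^ e) k j := by
    have h1 : ∀ (i : Fin (2*v)) (j : Fin v), (pvE v * pvU v ^ e) i j
        = ∑ k : Fin v, pvE v i k * (pvU v ^ e) k j := fun i j => Matrix.mul_apply
    calc (∑ i : Fin (2*v), ∑ j : Fin v, (pvE v * pvU v ^ e) i j)
        = ∑ i : Fin (2*v), ∑ j : Fin v, ∑ k : Fin v, pvE v i k * (pvU v ^ e) k j := by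
          exact Finset.sum_congr rfl (fun i _ => Finset.sum_congr rfl (fun j _ => h1 i j))
      _ = ∑ j : Fin v, ∑ i : Fin (2*v), ∑ k : Fin v, pvE v i k * (pvU v ^ e) k j := Finset.sum_comm
      _ = ∑ j : Fin v, ∑ k : Fin v, ∑ i : Fin (2*v), pvE v i k * (pvU v ^ e) k j := by
          exact Finset.sum_congr rfl (fun j _ => Finset.sum_comm)
      _ = ∑ j : Fin v, ∑ k : Fin v, (∑ i : Fin (2*v), pvE v i k) * (pvU v ^ e) k j := by
          refine Finset.sum_congr rfl (fun j _ => Finset.sum_congr rfl (fun k _ => ?_))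
          rw [Finset.sum_mul]
      _ = ∑ j : Fin v, ∑ k : Fin v, 2 * (pvU v ^ e) k j := by
          refine Finset.sum_congr rfl (fun j _ => Finset.sum_congr rfl (fun k _ => ?_))
          rw [pv_E_col v hv k]
      _ = 2 * ∑ k : Fin v, ∑ j : Fin v, (pvU v ^ e) k j := by
          rw [Finset.mul_sum, Finset.sum_comm]
          exact Finset.sum_congr rfl (fun j _ => by rw [Finset.mul_sum])
  rw [← way1, pv_pow_comm v hv e, way2]

-- row invariant for the inner two loops of B's mul (running mod accumulation)
theorem pv_row_foldB {v : ℕ} (X Y : List (List Int)) (i : ℕ)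
    (hYr : ∀ row ∈ Y, row.length = v) (hYlen : Y.length = v) :
    ∀ (ts : List ℕ) (init : List Int), (∀ x ∈ ts, x < v) → init.length = v →
      (ts.foldl (fun row t =>
          List.zipWith (fun acc y => (acc + (X[i]!)[t]! * y) % (1000000007:Int)) row (Y[t]!))
        init).length = v ∧
      ∀ j : ℕ, j < v →
        (((ts.foldl (fun row t =>
            List.zipWith (fun acc y => (acc + (X[i]!)[t]! * y) % (1000000007:Int)) row (Y[t]!))
          init)[j]! : Int) : ZMod pvp)
          = ((init[j]! : Int) : ZMod pvp)
            + ((ts.map (fun t => (((X[i]!)[t]! : Int) : ZMod pvp) * (((Y[t]!)[j]! : Int) : ZMod pvp))).sum) := by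
  intro ts
  induction ts with
  | nil => intro init _ hinit; exact ⟨hinit, fun j hj => by simp⟩
  | cons t ts ih =>
    intro init hts hinit
    have ht : t < v := hts t (List.mem_cons_self)
    have hYt : (Y[t]!).length = v := by
      rw [getElem!_pos Y t (by omega)]
      exact hYr _ (List.getElem_mem _)
    have hs1 : (List.zipWith (fun acc y => (acc + (X[i]!)[t]! * y) % (1000000007:Int)) init (Y[t]!)).length = v := by
      rw [List.length_zipWith]; omega
    have hs2 : ∀ j : ℕ, j < v →
        (((List.zipWith (fun acc y => (acc + (X[i]!)[t]! * y) % (1000000007:Int)) init (Y[t]!))[j]! : Int) : ZMod pvp)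
          = ((init[j]! : Int) : ZMod pvp) + (((X[i]!)[t]! : Int) : ZMod pvp) * (((Y[t]!)[j]! : Int) : ZMod pvp) := by
      intro j hj
      rw [getElem!_pos _ j (by omega), List.getElem_zipWith,
          getElem!_pos init j (by omega), getElem!_pos (Y[t]!) j (by omega)]
      rw [pv_castmod]
      push_cast
      ring
    simp only [List.foldl_cons]
    obtain ⟨ih1, ih2⟩ := ih _ (fun x hx => hts x (List.mem_cons_of_mem _ hx)) hs1
    refine ⟨ih1, fun j hj => ?_⟩
    rw [ih2 j hj, hs2 j hj, List.map_cons, List.sum_cons]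
    ring

theorem pv_mulB_rep {v : ℕ} {X Y : List (List Int)}
    {NX NY : Matrix (Fin v) (Fin v) (ZMod pvp)}
    (hX : MRep v v X NX) (hY : MRep v v Y NY) :
    MRep v v (pvMulB X Y 1000000007) (NX * NY) := by
  obtain ⟨hXlen, hXrows, hXe⟩ := hX
  obtain ⟨hYlen, hYrows, hYe⟩ := hY
  have hres : pvMulB X Y 1000000007 = (List.range v).map (fun i =>
      (List.range v).foldl (fun row t =>
        List.zipWith (fun acc y => (acc + (X[i]!)[t]! * y) % (1000000007:Int)) row (Y[t]!))
      (List.replicate v 0)) := by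
    unfold pvMulB
    rw [hXlen]
  have hrowfold := pv_row_foldB (v := v) X Y (hYr := hYrows) (hYlen := hYlen)
  rw [hres]
  refine ⟨by simp, ?_, ?_⟩
  · intro row hrow
    simp only [List.mem_map, List.mem_range] at hrow
    obtain ⟨r, hr, rfl⟩ := hrow
    exact (hrowfold r (List.range v) (List.replicate v 0) (by simp) (by simp)).1
  · intro i j
    rw [getElem!_pos _ i.1 (by simp [i.isLt]), List.getElem_map, List.getElem_range]
    obtain ⟨-, hent⟩ := hrowfold i.1 (List.range v) (List.replicate v 0) (by simp) (by simp)
    rw [hent j.1 j.isLt]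
    rw [getElem!_pos _ j.1 (by simp [j.isLt]), List.getElem_replicate]
    rw [Int.cast_zero, zero_add]
    have : ((List.range v).map (fun t => (((X[i.1]!)[t]! : Int) : ZMod pvp) * (((Y[t]!)[j.1]! : Int) : ZMod pvp))).sum
        = ∑ t ∈ Finset.range v, (((X[i.1]!)[t]! : Int) : ZMod pvp) * (((Y[t]!)[j.1]! : Int) : ZMod pvp) := rfl
    rw [this, Matrix.mul_apply]
    apply pv_sum_range_fin
    intro t ht
    rw [← hXe i ⟨t, ht⟩, ← hYe ⟨t, ht⟩ j]

theorem pv_powB_rep {v : ℕ} :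
    ∀ (fuel : ℕ) (e : Int), e.toNat ≤ fuel →
    ∀ {M : List (List Int)} {NM : Matrix (Fin v) (Fin v) (ZMod pvp)},
      MRep v v M NM →
      MRep v v (pvPowB M e 1000000007) (NM ^ e.toNat) := by
  intro fuel
  induction fuel with
  | zero =>
    intro e hle M NM hM
    have he : e ≤ 0 := by omega
    rw [pvPowB, if_pos he]
    have h0 : e.toNat = 0 := by omega
    rw [h0, pow_zero, hM.1]
    refine ⟨by simp, ?_, ?_⟩
    · intro row hrow
      simp only [List.mem_map, List.mem_range] at hrow
      obtain ⟨i, hi, rfl⟩ := hrow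
      simp
    · intro i j
      rw [getElem!_pos _ i.1 (by simp [i.isLt]), List.getElem_map, List.getElem_range,
          getElem!_pos _ j.1 (by simp [j.isLt]), List.getElem_map, List.getElem_range,
          Matrix.one_apply]
      by_cases hij : i.1 = j.1
      · rw [if_pos hij, if_pos (Fin.ext hij)]
        simp
      · rw [if_neg hij, if_neg (fun h => hij (congrArg Fin.val h))]
        simp
  | succ fuel ih =>
    intro e hle M NM hM
    by_cases he : e ≤ 0
    · rw [pvPowB, if_pos he]
      have h0 : e.toNat = 0 := by omega
      rw [h0, pow_zero, hM.1]
      refine ⟨by simp, ?_, ?_⟩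
      · intro row hrow
        simp only [List.mem_map, List.mem_range] at hrow
        obtain ⟨i, hi, rfl⟩ := hrow
        simp
      · intro i j
        rw [getElem!_pos _ i.1 (by simp [i.isLt]), List.getElem_map, List.getElem_range,
            getElem!_pos _ j.1 (by simp [j.isLt]), List.getElem_map, List.getElem_range,
            Matrix.one_apply]
        by_cases hij : i.1 = j.1
        · rw [if_pos hij, if_pos (Fin.ext hij)]
          simp
        · rw [if_neg hij, if_neg (fun h => hij (congrArg Fin.val h))]
          simp
    · rw [pvPowB, if_neg he]
      have hfd : PySem.Int.floordiv e 2 = e / 2 := PySem.Int.floordiv_eq_ediv_of_pos (by norm_num)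
      have hmd : PySem.Int.mod e 2 = e % 2 := PySem.Int.mod_eq_emod_of_pos (by norm_num)
      have hH := ih (PySem.Int.floordiv e 2) (by rw [hfd]; omega) hM
      have hS := pv_mulB_rep hH hH
      have hSpow : NM ^ (PySem.Int.floordiv e 2).toNat * NM ^ (PySem.Int.floordiv e 2).toNat
          = NM ^ (2 * (e.toNat / 2)) := by
        rw [← pow_add, hfd]
        congr 1
        omega
      rw [hSpow] at hS
      by_cases hodd : PySem.Int.mod e 2 ≠ 0
      · simp only [if_pos hodd]
        have := pv_mulB_rep hS hM
        have heq : NM ^ (2 * (e.toNat / 2)) * NM = NM ^ e.toNat := by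
          rw [← pow_succ]
          congr 1
          rw [hmd] at hodd
          omega
        rwa [heq] at this
      · simp only [if_neg hodd]
        have heq : (2 * (e.toNat / 2)) = e.toNat := by
          rw [hmd] at hodd
          omega
        rwa [heq] at hS

-- the two ports agree modulo 10^9+7, stated over the shared parameters v = vals, e = n-1
theorem pv_main (v : ℕ) (hv : 0 < v) (e : Int) :
    (((pvMatMul
        (pvMatExpo
          ((List.range v).foldl (fun m down =>
              (List.range down).foldl (fun m up => pvSet m (down + v) up 1) m)
            ((List.range v).foldl (fun m up =>
              (List.range' (up+1) (v - (up+1))).foldl (fun m down => pvSet m up (down + v) 1) m)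
              ((List.range (2*v)).map (fun _ => List.replicate (2*v) (0:Int)))))
          e 1000000007)
        (List.replicate (2*v) [(1:Int)]) 1000000007).map (fun row => row[0]!)).sum) % 1000000007
    = 2 * (((pvPowB
        ((List.range v).map (fun i => (List.range v).map (fun j => if i + j + 1 < v then (1:Int) else 0)))
        e 1000000007).map (fun row => row.sum)).sum) % 1000000007 := by
  have hk : 0 < 2*v := by omega
  have hmat := pv_matBuild_rep v hv
  have hexpo := pv_matExpo_rep hk e hmat
  have hstate : MRep (2*v) 1 (List.replicate (2*v) [(1:Int)]) (pvW0 v) := by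
    refine ⟨by simp, ?_, ?_⟩
    · intro row hrow
      rw [List.eq_of_mem_replicate hrow]
      rfl
    · intro i j
      have hj0 : j.1 = 0 := by omega
      rw [getElem!_pos _ i.1 (by simpa using i.isLt), List.getElem_replicate, hj0,
          List.getElem!_cons_zero]
      simp [pvW0]
  have hns := pv_matMul_rep hk hexpo hstate
  obtain ⟨hnslen, hnsrows, hnsent⟩ := hns
  have hT : MRep v v
      ((List.range v).map (fun i => (List.range v).map (fun j => if i + j + 1 < v then (1:Int) else 0)))
      (pvU v) := by
    refine ⟨by simp, ?_, ?_⟩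
    · intro row hrow
      simp only [List.mem_map, List.mem_range] at hrow
      obtain ⟨i, hi, rfl⟩ := hrow
      simp
    · intro i j
      rw [getElem!_pos _ i.1 (by simp [i.isLt]), List.getElem_map, List.getElem_range,
          getElem!_pos _ j.1 (by simp [j.isLt]), List.getElem_map, List.getElem_range]
      unfold pvU
      by_cases hc : i.1 + j.1 + 1 < v
      · rw [if_pos hc, if_pos hc]
        simp
      · rw [if_neg hc, if_neg hc]
        simp
  have hP := pv_powB_rep e.toNat e le_rfl hT
  obtain ⟨hPlen, hProws, hPent⟩ := hP
  apply pv_mod_eq_of_cast_eq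
  set NS := pvMatMul
        (pvMatExpo
          ((List.range v).foldl (fun m down =>
              (List.range down).foldl (fun m up => pvSet m (down + v) up 1) m)
            ((List.range v).foldl (fun m up =>
              (List.range' (up+1) (v - (up+1))).foldl (fun m down => pvSet m up (down + v) 1) m)
              ((List.range (2*v)).map (fun _ => List.replicate (2*v) (0:Int)))))
          e 1000000007)
        (List.replicate (2*v) [(1:Int)]) 1000000007 with hNSdef
  set PB := pvPowB
        ((List.range v).map (fun i => (List.range v).map (fun j => if i + j + 1 < v then (1:Int) else 0)))
        e 1000000007 with hPBdef
  rw [pv_list_cast_sum_fin (NS.map (fun row => row[0]!))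
        (by rw [List.length_map, hnslen])
        (fun i => (pvM v ^ e.toNat * pvW0 v) i ⟨0, Nat.one_pos⟩)
        (fun i => by
          have h1 : (((NS[i.1]!)[0]! : Int) : ZMod pvp)
              = (pvM v ^ e.toNat * pvW0 v) i ⟨0, Nat.one_pos⟩ := hnsent i ⟨0, Nat.one_pos⟩
          show (((NS.map (fun row => row[0]!))[i.1]! : Int) : ZMod pvp)
              = (pvM v ^ e.toNat * pvW0 v) i ⟨0, Nat.one_pos⟩
          rw [getElem!_pos _ i.1 (by rw [List.length_map, hnslen]; exact i.isLt),
              List.getElem_map, ← h1]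
          congr 1
          rw [getElem!_pos _ i.1 (by rw [hnslen]; exact i.isLt)])]
  have hW : ∀ i : Fin (2*v), (pvM v ^ e.toNat * pvW0 v) i ⟨0, Nat.one_pos⟩
      = ∑ k : Fin (2*v), (pvM v ^ e.toNat) i k := by
    intro i
    rw [Matrix.mul_apply]
    exact Finset.sum_congr rfl (fun k _ => by rw [show pvW0 v k ⟨0, Nat.one_pos⟩ = 1 from rfl, mul_one])
  rw [Finset.sum_congr rfl (fun i _ => hW i), pv_entry_sums v hv e.toNat,
      Int.cast_mul, Int.cast_two]
  rw [pv_list_cast_sum_fin (PB.map (fun row => row.sum))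
        (by rw [List.length_map, hPlen])
        (fun k => ∑ j : Fin v, (pvU v ^ e.toNat) k j)
        (fun k => by
          show (((PB.map (fun row => row.sum))[k.1]! : Int) : ZMod pvp)
              = ∑ j : Fin v, (pvU v ^ e.toNat) k j
          rw [getElem!_pos _ k.1 (by rw [List.length_map, hPlen]; exact k.isLt),
              List.getElem_map]
          have hrowlen : (PB[k.1]'(by rw [hPlen]; exact k.isLt)).length = v :=
            hProws _ (List.getElem_mem _)
          rw [pv_list_cast_sum_fin (PB[k.1]'(by rw [hPlen]; exact k.isLt)) hrowlen
                (fun j => (pvU v ^ e.toNat) k j)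
                (fun j => by
                  show (((PB[k.1]'(by rw [hPlen]; exact k.isLt))[j.1]! : Int) : ZMod pvp)
                      = (pvU v ^ e.toNat) k j
                  rw [← hPent k j]
                  congr 1
                  rw [getElem!_pos PB k.1 (by rw [hPlen]; exact k.isLt)])])]

-- ===== VERDICT (by name: the statement is the Claim_ definition above) =====
theorem zigZagArrays_spec : Claim_equal_zigZagArrays := by
  unfold Claim_equal_zigZagArrays
  intro n l r _ hpre
  unfold Spec_zigZagArrays
  unfold Pre_zigZagArrays at hpre
  have hv : 0 < (r - l + 1).toNat := by omega
  exact pv_main ((r - l + 1).toNat) hv (n - 1)
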